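-- pv_equiv track=rewrite | github.com/cosmosapjw-quantum/omoknuni_quantum | python/mcts/quantum/holographic_bounds.py | _find_minimal_subtree
-- ===== SOURCE A (Python) =====
-- from typing import List, Dict, Any, Optional, Tuple, Set
--
-- def _find_minimal_subtree(tree_structure: Dict[str, Any],
--                         target_nodes: List[int]) -> Set[int]:
--     """Find minimal subtree containing target nodes"""
--     # Build parent pointers
--     edges = tree_structure.get('edges', [])
--     parents = {}
--
--     for parent, child in edges:
--         parents[child] = parent
--
--     # Find all ancestors of target nodes
--     subtree = set(target_nodes)
--
--     for node in target_nodes: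
--         current = node
--         while current in parents:
--             current = parents[current]
--             subtree.add(current)
--
--     return subtree
-- ===== SOURCE B (Python) =====
-- from typing import List, Dict, Any, Set
--
-- def _find_minimal_subtree(tree_structure: Dict[str, Any],
--                         target_nodes: List[int]) -> Set[int]:
--     """Find minimal subtree containing target nodes.
--
--     Ancestor chains are cached: 'anc' maps a node to its full list of
--     ancestors (in climb order).  For each target we climb only up to the
--     first node with a cached chain (or a root), then build and cache the
--     chains for the fresh part of the path back-to-front, so each climb is
--     cut short at the first already-resolved node.
--     """
--     parents = {child: parent
--                for parent, child in tree_structure.get('edges', [])}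
--
--     anc = {}                      # node -> full ancestor chain of node
--     subtree = set(target_nodes)
--
--     for t in target_nodes:
--         # phase 1: climb until a cached node or a root, recording the path
--         path = []
--         cur = t
--         while cur not in anc and cur in parents:
--             path.append(cur)
--             cur = parents[cur]
--         # phase 2: build the chains for the path back-to-front and cache them
--         chain = anc.get(cur, [])
--         for node in reversed(path):
--             chain = [parents[node]] + chain
--             anc[node] = chain
--         subtree.update(chain)
--
--     return subtree
-- ===== Notes on version B (the rewrite author's own statement) =====
-- stated objective: alternative
-- what changed: B caches full ancestor chains per node: each target's climb stops at the first node whose chain is already cached (or a root), the fresh part of the path is resolved back-to-front into cached chains, and the target's whole chain is added in one update, instead of A's full uncached climb per target.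
import Mathlib
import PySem

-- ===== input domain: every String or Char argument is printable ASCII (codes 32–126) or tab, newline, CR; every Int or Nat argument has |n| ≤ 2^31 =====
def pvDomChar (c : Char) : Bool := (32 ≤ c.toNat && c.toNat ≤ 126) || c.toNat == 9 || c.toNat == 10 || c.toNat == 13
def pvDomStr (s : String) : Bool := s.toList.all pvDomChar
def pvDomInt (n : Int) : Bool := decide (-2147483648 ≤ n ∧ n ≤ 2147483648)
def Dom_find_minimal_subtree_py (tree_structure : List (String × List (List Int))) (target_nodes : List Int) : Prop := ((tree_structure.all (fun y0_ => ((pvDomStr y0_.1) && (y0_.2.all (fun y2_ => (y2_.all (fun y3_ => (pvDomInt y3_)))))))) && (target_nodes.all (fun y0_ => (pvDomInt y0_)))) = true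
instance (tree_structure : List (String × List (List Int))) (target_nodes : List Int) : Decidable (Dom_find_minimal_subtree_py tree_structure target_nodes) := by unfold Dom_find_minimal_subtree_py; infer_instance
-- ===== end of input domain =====

-- B replaces A's full uncached ancestor climb per target by a cache of full ancestor
-- chains: each climb stops at the first cached node (or a root), the fresh part of the
-- path is resolved back-to-front into cached chains, and the whole chain is added at once.

-- ===== PORT A =====
-- shared by both ports (both Pythons build the same parent map) and by Pre_:
-- parents[child] = parent for each well-formed edge [parent, child]
def pvParents (tree_structure : List (String × List (List Int))) : PySem.Dict Int Int :=
  ((PySem.Dict.mk tree_structure).getD "edges" []).foldl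
    (fun d e =>
      match e with
      | [p, c] => d.insert c p
      | _ => d)   -- Python raises ValueError here (unpacking); excluded by Pre_
    (PySem.Dict.mk [])

-- A's inner while loop: climb the full ancestor chain, adding every ancestor.
-- fuel makes the loop total; Pre_ guarantees the chain ends within the fuel.
def pvClimbA (P : PySem.Dict Int Int) : Nat → Int → PySem.Set Int → PySem.Set Int
  | 0, _, s => s
  | f+1, cur, s =>
    match P.get? cur with
    | none => s
    | some p => pvClimbA P f p (PySem.Set.add s p)

def find_minimal_subtree_py (tree_structure : List (String × List (List Int))) (target_nodes : List Int) : List Int :=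
  let parents := pvParents tree_structure
  target_nodes.foldl (fun s n => pvClimbA parents (parents.items.length + 1) n s)
    (PySem.Set.ofList target_nodes)

-- ===== PORT B =====
-- B's phase-1 while loop: climb recording the path, stop at a cached node or a root.
-- fuel makes the loop total; Pre_ guarantees the chain ends within the fuel.
def pvPath (P : PySem.Dict Int Int) (anc : PySem.Dict Int (List Int)) : Nat → Int → List Int × Int
  | 0, cur => ([], cur)
  | f+1, cur =>
    if anc.contains cur then ([], cur)
    else
      match P.get? cur with
      | none => ([], cur)
      | some p =>
        let r := pvPath P anc f p
        (cur :: r.1, r.2)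

def find_minimal_subtree_py_alt (tree_structure : List (String × List (List Int))) (target_nodes : List Int) : List Int :=
  let parents := pvParents tree_structure
  (target_nodes.foldl
    (fun st t =>
      let pr := pvPath parents st.2 (parents.items.length + 1) t
      -- phase 2: reversed(path) loop, building the chains and caching them.
      -- 'parents[node]' is total here: every node on the path has a parent by
      -- construction of phase 1, so the .getD 0 default is never consulted.
      let bld := pr.1.reverse.foldl
        (fun ca node =>
          let c := ((parents.get? node).getD 0) :: ca.1
          (c, ca.2.insert node c))
        (st.2.getD pr.2 [], st.2)
      (bld.1.foldl PySem.Set.add st.1, bld.2))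
    (PySem.Set.ofList target_nodes, (PySem.Dict.empty : PySem.Dict Int (List Int)))).1

-- ===== PRECONDITION & SPEC =====
-- one parent-pointer step; fixpoint on non-children
def pvStep (P : PySem.Dict Int Int) (x : Int) : Int := (P.get? x).getD x

-- Pre_ = exactly the inputs where Python A returns: every edge is a [parent, child] pair
-- (else tuple unpacking raises ValueError), and from every target the parent chain leaves
-- the child set within |parents| steps (else A's while loop never terminates).
def Pre_find_minimal_subtree_py (tree_structure : List (String × List (List Int))) (target_nodes : List Int) : Prop :=
  (∀ e ∈ (PySem.Dict.mk tree_structure).getD "edges" ([] : List (List Int)), e.length = 2) ∧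
  (∀ t ∈ target_nodes,
    (pvStep (pvParents tree_structure))^[(pvParents tree_structure).items.length] t ∉ (pvParents tree_structure).keys)

instance (tree_structure : List (String × List (List Int))) (target_nodes : List Int) : Decidable (Pre_find_minimal_subtree_py tree_structure target_nodes) := by unfold Pre_find_minimal_subtree_py; infer_instance

def pvWitness_find_minimal_subtree_py : (List (String × List (List Int))) × List Int :=
  ([("edges", [[1, 2], [1, 3], [0, 1]])], [2, 3])

def Spec_find_minimal_subtree_py (tree_structure : List (String × List (List Int))) (target_nodes : List Int) (out : List Int) : Prop := out = find_minimal_subtree_py_alt tree_structure target_nodes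
instance (tree_structure : List (String × List (List Int))) (target_nodes : List Int) (out : List Int) : Decidable (Spec_find_minimal_subtree_py tree_structure target_nodes out) := by unfold Spec_find_minimal_subtree_py; infer_instance

-- ===== CLAIM (what is proved, stated in full; the proofs are below) =====
def Claim_equal_find_minimal_subtree_py : Prop := ∀ (tree_structure : List (String × List (List Int))) (target_nodes : List Int), Dom_find_minimal_subtree_py tree_structure target_nodes → Pre_find_minimal_subtree_py tree_structure target_nodes → Spec_find_minimal_subtree_py tree_structure target_nodes (find_minimal_subtree_py tree_structure target_nodes)

-- ===== LEMMAS AND PROOFS =====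

-- the list of ancestors A's climb from x would add, cut off at fuel f
def pvChain (P : PySem.Dict Int Int) : Nat → Int → List Int
  | 0, _ => []
  | f+1, x =>
    match P.get? x with
    | none => []
    | some p => p :: pvChain P f p

-- the chain from x is finished within |P| steps (no cycle reachable from x)
def pvComplete (P : PySem.Dict Int Int) (x : Int) : Prop :=
  pvChain P P.items.length x = pvChain P (P.items.length + 1) x

-- cache invariant: every cached entry is the complete ancestor chain of its key
def pvInv (P : PySem.Dict Int Int) (anc : PySem.Dict Int (List Int)) : Prop :=
  ∀ k l, anc.get? k = some l → pvComplete P k ∧ l = pvChain P P.items.length k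

theorem pvChain_len (P : PySem.Dict Int Int) : ∀ (f : Nat) (x : Int), (pvChain P f x).length ≤ f := by
  intro f
  induction f with
  | zero => intro x; simp [pvChain]
  | succ f ih =>
    intro x
    cases h : P.get? x with
    | none => simp [pvChain, h]
    | some p =>
      simp only [pvChain, h, List.length_cons]
      have := ih p
      omega

theorem pvStable_step (P : PySem.Dict Int Int) : ∀ (g : Nat) (x : Int), pvChain P g x = pvChain P (g+1) x → pvChain P (g+1) x = pvChain P (g+2) x := by
  intro g
  induction g with
  | zero =>
    intro x h
    cases hx : P.get? x with
    | none => simp [pvChain, hx]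
    | some p => simp [pvChain, hx] at h
  | succ g ih =>
    intro x h
    cases hx : P.get? x with
    | none => simp [pvChain, hx]
    | some p =>
      simp only [pvChain, hx, List.cons.injEq, true_and] at h ⊢
      exact ih p h

theorem pvChain_none (P : PySem.Dict Int Int) {x : Int} (hx : P.get? x = none) :
    ∀ (f : Nat), pvChain P f x = [] := by
  intro f
  cases f with
  | zero => rfl
  | succ f => simp [pvChain, hx]

theorem pvCompleteStep (P : PySem.Dict Int Int) {x p : Int} (hc : pvComplete P x)
    (hp : P.get? x = some p) :
    pvChain P P.items.length x = p :: pvChain P P.items.length p ∧ pvComplete P p := by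
  obtain ⟨m', hm'⟩ : ∃ m', P.items.length = m' + 1 := by
    refine ⟨P.items.length - 1, ?_⟩
    rcases hn : P.items with _ | ⟨e, es⟩
    · exfalso
      rcases P with ⟨items⟩
      simp at hn
      subst hn
      simp [PySem.Dict.get?] at hp
    · simp
  unfold pvComplete at hc ⊢
  rw [hm'] at hc ⊢
  simp only [pvChain, hp, List.cons.injEq, true_and] at hc ⊢
  have h2 := pvStable_step P m' p hc
  exact ⟨by rw [← hc], h2⟩

theorem pvClimbA_eq_foldl (P : PySem.Dict Int Int) : ∀ (f : Nat) (cur : Int) (s : PySem.Set Int),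
    pvClimbA P f cur s = (pvChain P f cur).foldl PySem.Set.add s := by
  intro f
  induction f with
  | zero => intro cur s; simp [pvClimbA, pvChain]
  | succ f ih =>
    intro cur s
    cases h : P.get? cur with
    | none => simp [pvClimbA, pvChain, h]
    | some p => simp only [pvClimbA, pvChain, h, List.foldl_cons]; exact ih p _

theorem pvBridge (P : PySem.Dict Int Int) : ∀ (j : Nat) (x : Int),
    (pvStep P)^[j] x ∉ P.keys → pvChain P j x = pvChain P (j+1) x := by
  intro j
  induction j with
  | zero =>
    intro x hx
    have h : P.get? x = none := (PySem.Dict.get?_eq_none_iff_not_mem_keys P x).mpr hx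
    simp [pvChain, h]
  | succ j ih =>
    intro x hx
    cases h : P.get? x with
    | none => simp [pvChain, h]
    | some p =>
      have hs : pvStep P x = p := by simp [pvStep, h]
      rw [Function.iterate_succ_apply, hs] at hx
      simp only [pvChain, h, List.cons.injEq, true_and]
      exact ih p hx

-- one target of B: phase 1 + phase 2 produce exactly the target's complete chain,
-- and the cache invariant is preserved
theorem pvRun (P : PySem.Dict Int Int) : ∀ (f : Nat) (cur : Int) (anc : PySem.Dict Int (List Int)),
    pvComplete P cur → (pvChain P P.items.length cur).length < f → pvInv P anc →
    ((pvPath P anc f cur).1.reverse.foldl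
        (fun ca node =>
          let c := ((P.get? node).getD 0) :: ca.1
          (c, ca.2.insert node c))
        (anc.getD (pvPath P anc f cur).2 [], anc)).1 = pvChain P P.items.length cur ∧
    pvInv P ((pvPath P anc f cur).1.reverse.foldl
        (fun ca node =>
          let c := ((P.get? node).getD 0) :: ca.1
          (c, ca.2.insert node c))
        (anc.getD (pvPath P anc f cur).2 [], anc)).2 := by
  intro f
  induction f with
  | zero => intro cur anc _ hlen _; omega
  | succ f ih =>
    intro cur anc hc hlen hinv
    by_cases hA : anc.contains cur = true
    · have hsome : ∃ l, anc.get? cur = some l := by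
        rcases h : anc.get? cur with _ | l
        · rw [PySem.Dict.contains_eq_isSome_get?, h] at hA; simp at hA
        · exact ⟨l, rfl⟩
      obtain ⟨l, hl⟩ := hsome
      have hpath : pvPath P anc (f+1) cur = ([], cur) := by simp [pvPath, hA]
      rw [hpath]
      simp only [List.reverse_nil, List.foldl_nil]
      refine ⟨?_, hinv⟩
      rw [PySem.Dict.getD_eq_get?_getD, hl]
      simp only [Option.getD_some]
      exact (hinv cur l hl).2
    · cases hP : P.get? cur with
      | none =>
        have hpath : pvPath P anc (f+1) cur = ([], cur) := by simp [pvPath, hA, hP]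
        rw [hpath]
        simp only [List.reverse_nil, List.foldl_nil]
        refine ⟨?_, hinv⟩
        have hAc : anc.contains cur = false := by simpa using hA
        have hnone : anc.get? cur = none := by
          rcases h : anc.get? cur with _ | l
          · rfl
          · rw [PySem.Dict.contains_eq_isSome_get?, h] at hAc; simp at hAc
        rw [PySem.Dict.getD_eq_get?_getD, hnone, Option.getD_none, pvChain_none P hP]
      | some p =>
        obtain ⟨hce, hcp⟩ := pvCompleteStep P hc hP
        have hpath : pvPath P anc (f+1) cur = (cur :: (pvPath P anc f p).1, (pvPath P anc f p).2) := by
          simp [pvPath, hA, hP]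
        have hlen' : (pvChain P P.items.length p).length < f := by
          have := congrArg List.length hce
          simp at this
          omega
        have hih := ih p anc hcp hlen' hinv
        rw [hpath]
        simp only [List.reverse_cons, List.foldl_append, List.foldl_cons, List.foldl_nil]
        constructor
        · simp only [hih.1, hP, Option.getD_some, hce]
        · intro k l hkl
          rw [PySem.Dict.get?_insert] at hkl
          split_ifs at hkl with hk
          · simp only [Option.some.injEq] at hkl
            constructor
            · rw [hk]; exact hc
            · rw [hk, ← hkl, hih.1, hP, hce]; simp
          · exact hih.2 k l hkl

-- the target fold: B's subtree component equals A's fold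
theorem pvFoldB (P : PySem.Dict Int Int) : ∀ (ts : List Int) (S : PySem.Set Int) (anc : PySem.Dict Int (List Int)),
    (∀ t ∈ ts, pvComplete P t) → pvInv P anc →
    (ts.foldl
      (fun st t =>
        let pr := pvPath P st.2 (P.items.length + 1) t
        let bld := pr.1.reverse.foldl
          (fun ca node =>
            let c := ((P.get? node).getD 0) :: ca.1
            (c, ca.2.insert node c))
          (st.2.getD pr.2 [], st.2)
        (bld.1.foldl PySem.Set.add st.1, bld.2))
      (S, anc)).1
    = ts.foldl (fun s n => pvClimbA P (P.items.length + 1) n s) S := by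
  intro ts
  induction ts with
  | nil => intro S anc _ _; rfl
  | cons t ts ih =>
    intro S anc hts hinv
    have hct := hts t List.mem_cons_self
    have hrun := pvRun P (P.items.length + 1) t anc hct
      (by have := pvChain_len P P.items.length t; omega) hinv
    simp only [List.foldl_cons]
    rw [ih _ _ (fun u hu => hts u (List.mem_cons_of_mem t hu)) hrun.2]
    congr 1
    rw [hrun.1, pvClimbA_eq_foldl, ← hct]

-- ===== VERDICT (by name: the statement is the Claim_ definition above) =====
theorem find_minimal_subtree_py_spec : Claim_equal_find_minimal_subtree_py := by
  intro tree_structure target_nodes _ hpre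
  unfold Spec_find_minimal_subtree_py find_minimal_subtree_py find_minimal_subtree_py_alt
  refine (pvFoldB (pvParents tree_structure) target_nodes
    (PySem.Set.ofList target_nodes) PySem.Dict.empty ?_ ?_).symm
  · intro t ht
    exact pvBridge (pvParents tree_structure) (pvParents tree_structure).items.length t (hpre.2 t ht)
  · intro k l hkl
    simp [PySem.Dict.get?_empty] at hkl
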